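-- pv_equiv track=rewrite | github.com/HSF007/da6401_assignment3 | utils.py | indices_to_string
-- ===== SOURCE A (Python) =====
-- def indices_to_string(indices, idx_to_char, eos_idx=None):
--     """Convert a sequence of indices to a string"""
--     if eos_idx is not None:
--         # Find the index of the first EOS token
--         try:
--             eos_pos = indices.index(eos_idx)
--             indices = indices[:eos_pos]
--         except ValueError:
--             pass  # No EOS token found
--
--     return ''.join([idx_to_char[idx] for idx in indices if idx in idx_to_char and idx_to_char[idx] not in ['<PAD>', '< SOS >', '<EOS>']])
-- ===== SOURCE B (Python) =====
-- def indices_to_string(indices, idx_to_char, eos_idx=None):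
--     """Convert a sequence of indices to a string"""
--     parts = []
--     for idx in indices:
--         if eos_idx is not None and idx == eos_idx:
--             break
--         ch = idx_to_char.get(idx)
--         if ch is not None and ch not in ('<PAD>', '< SOS >', '<EOS>'):
--             parts.append(ch)
--     return ''.join(parts)
-- ===== Notes on version B (the rewrite author's own statement) =====
-- stated objective: simpler
-- what changed: Replaces A's three passes (indices.index scan, slice copy, filtering comprehension) with one loop that breaks at the EOS index and appends kept characters as it goes.
import Mathlib
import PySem

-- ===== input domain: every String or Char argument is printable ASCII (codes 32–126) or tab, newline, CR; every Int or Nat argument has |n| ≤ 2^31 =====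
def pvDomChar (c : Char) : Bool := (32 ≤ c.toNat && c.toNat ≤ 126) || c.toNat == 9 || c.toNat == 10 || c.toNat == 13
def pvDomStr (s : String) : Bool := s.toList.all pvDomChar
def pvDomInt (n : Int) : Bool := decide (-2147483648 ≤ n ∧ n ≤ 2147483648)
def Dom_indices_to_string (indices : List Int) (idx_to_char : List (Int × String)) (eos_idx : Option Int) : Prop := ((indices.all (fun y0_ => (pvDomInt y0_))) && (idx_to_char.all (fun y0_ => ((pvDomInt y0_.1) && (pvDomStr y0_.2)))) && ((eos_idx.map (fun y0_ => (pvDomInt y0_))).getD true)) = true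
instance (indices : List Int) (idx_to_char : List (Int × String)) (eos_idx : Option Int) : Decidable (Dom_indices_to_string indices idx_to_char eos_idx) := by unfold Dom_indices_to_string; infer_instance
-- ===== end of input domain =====

-- B replaces A's locate-slice-filter (indices.index + slice + comprehension) by one loop that
-- breaks at the EOS index and appends kept characters as it goes (objective: simpler).

-- ===== PORT A =====
-- the comprehension's body: keep idx_to_char[idx] iff idx is a key and its value is not a special token
def pvKeep (d : PySem.Dict Int String) (idx : Int) : Option String :=
  match d.get? idx with
  | some s => if s = "<PAD>" ∨ s = "< SOS >" ∨ s = "<EOS>" then none else some s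
  | none => none

def indices_to_string (indices : List Int) (idx_to_char : List (Int × String)) (eos_idx : Option Int) : String :=
  let d := PySem.Dict.ofList idx_to_char
  let indices :=
    match eos_idx with
    | none => indices
    | some e =>
      match PySem.List.index? indices e with
      | some pos => PySem.List.slice indices none (some (pos : Int))   -- indices[:eos_pos]
      | none => indices                                               -- ValueError: pass
  PySem.Str.join "" (indices.filterMap (pvKeep d))

-- ===== PORT B =====
-- the single loop of Source B: break on eos, otherwise append the kept character
def pvGo (d : PySem.Dict Int String) (eos_idx : Option Int) : List Int → List String
  | [] => []
  | idx :: rest =>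
    if eos_idx = some idx then []
    else
      match d.get? idx with
      | some s =>
        if s = "<PAD>" ∨ s = "< SOS >" ∨ s = "<EOS>" then pvGo d eos_idx rest
        else s :: pvGo d eos_idx rest
      | none => pvGo d eos_idx rest

def indices_to_string_alt (indices : List Int) (idx_to_char : List (Int × String)) (eos_idx : Option Int) : String :=
  PySem.Str.join "" (pvGo (PySem.Dict.ofList idx_to_char) eos_idx indices)

-- ===== PRECONDITION & SPEC =====
def Spec_indices_to_string (indices : List Int) (idx_to_char : List (Int × String)) (eos_idx : Option Int) (out : String) : Prop := out = indices_to_string_alt indices idx_to_char eos_idx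
instance (indices : List Int) (idx_to_char : List (Int × String)) (eos_idx : Option Int) (out : String) : Decidable (Spec_indices_to_string indices idx_to_char eos_idx out) := by unfold Spec_indices_to_string; infer_instance

-- ===== CLAIM (what is proved, stated in full; the proofs are below) =====
def Claim_equal_indices_to_string : Prop := ∀ (indices : List Int) (idx_to_char : List (Int × String)) (eos_idx : Option Int), Dom_indices_to_string indices idx_to_char eos_idx → Spec_indices_to_string indices idx_to_char eos_idx (indices_to_string indices idx_to_char eos_idx)

-- ===== LEMMAS AND PROOFS =====

-- with no eos, the loop is just the filter pass
theorem pvGo_none (d : PySem.Dict Int String) (indices : List Int) :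
    pvGo d none indices = indices.filterMap (pvKeep d) := by
  induction indices with
  | nil => rfl
  | cons i rest ih =>
    simp only [pvGo, ih, List.filterMap_cons, pvKeep]
    cases h : d.get? i with
    | none => simp
    | some s => by_cases hs : s = "<PAD>" ∨ s = "< SOS >" ∨ s = "<EOS>" <;> simp [hs]

-- with an eos, the loop equals filtering the slice up to the first occurrence
theorem pvGo_some (d : PySem.Dict Int String) (e : Int) (indices : List Int) :
    pvGo d (some e) indices =
      (match PySem.List.index? indices e with
       | some pos => PySem.List.slice indices none (some (pos : Int))
       | none => indices).filterMap (pvKeep d) := by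
  induction indices with
  | nil => rfl
  | cons i rest ih =>
    by_cases hie : e = i
    · subst hie
      rw [PySem.List.index?_cons_self]
      show pvGo d (some e) (e :: rest) =
          List.filterMap (pvKeep d) (PySem.List.slice (e :: rest) none (some ((0:Nat):Int)))
      rw [PySem.List.slice_to_natCast]
      simp [pvGo]
    · rw [PySem.List.index?_cons_of_ne _ (fun h => hie h.symm)]
      have hstep : pvGo d (some e) (i :: rest) =
          (List.filterMap (pvKeep d) [i]) ++ pvGo d (some e) rest := by
        simp only [pvGo, Option.some.injEq, if_neg hie]
        cases h : d.get? i with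
        | none => simp [pvKeep, h]
        | some s =>
          by_cases hs : s = "<PAD>" ∨ s = "< SOS >" ∨ s = "<EOS>" <;>
            simp [pvKeep, h, hs]
      cases hq : PySem.List.index? rest e with
      | none =>
        simp only [Option.map_none]
        rw [hstep, ih, hq]
        cases hpk : pvKeep d i <;> simp [hpk]
      | some k =>
        simp only [Option.map_some]
        rw [hstep, ih, hq]
        have h1 : PySem.List.slice (i :: rest) none (some ((k + 1 : Nat) : Int)) =
            i :: PySem.List.slice rest none (some (k : Int)) := by
          rw [PySem.List.slice_to_natCast, PySem.List.slice_to_natCast]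
          simp [List.take_succ_cons]
        push_cast at h1 ⊢
        rw [h1]
        cases hpk : pvKeep d i <;> simp [hpk]

-- ===== VERDICT (by name: the statement is the Claim_ definition above) =====
theorem indices_to_string_spec : Claim_equal_indices_to_string := by
  intro indices idx_to_char eos_idx _
  unfold Spec_indices_to_string indices_to_string indices_to_string_alt
  cases eos_idx with
  | none => rw [pvGo_none]
  | some e => rw [pvGo_some]
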